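-- pv_equiv track=rewrite | github.com/jsvul/jsvul | filter_datasets/util/statistics.py | _url_to_pattern
-- ===== SOURCE A (Python) =====
-- def is_int(value):
--     """
--     Check if the value is an integer.
--     """
--     try:
--         int(value)
--         return True
--
--     except ValueError:
--         return False
--
-- def _url_to_pattern(url):
--     url_parts = url.split("/")
--     result = ""
--     for part in url_parts:
--         if part in ["commit", "commits", "pull", "files"]:
--             result += f"/{part}"
--             continue
--
--         if not result:
--             continue
--
--         if is_int(part):
--             result += "/[D]"
--
--         else:
--             result += f"/[X]"
--
--     return result
-- ===== SOURCE B (Python) =====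
-- def is_int(value):
--     """
--     Check if the value is an integer.
--     """
--     try:
--         int(value)
--         return True
--
--     except ValueError:
--         return False
--
-- _KEYWORDS = {"commit", "commits", "pull", "files"}
--
-- def _url_to_pattern(url):
--     parts = url.split("/")
--     for i, part in enumerate(parts):
--         if part in _KEYWORDS:
--             return "".join(
--                 f"/{p}" if p in _KEYWORDS
--                 else ("/[D]" if is_int(p) else "/[X]")
--                 for p in parts[i:])
--     return ""
-- ===== Notes on version B (the rewrite author's own statement) =====
-- stated objective: alternative
-- what changed: Replaces A's single fold whose accumulator doubles as a started-flag by an explicit two-phase decomposition: first find the index of the first keyword part, then map-and-join only the tail from that index.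
import Mathlib
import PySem

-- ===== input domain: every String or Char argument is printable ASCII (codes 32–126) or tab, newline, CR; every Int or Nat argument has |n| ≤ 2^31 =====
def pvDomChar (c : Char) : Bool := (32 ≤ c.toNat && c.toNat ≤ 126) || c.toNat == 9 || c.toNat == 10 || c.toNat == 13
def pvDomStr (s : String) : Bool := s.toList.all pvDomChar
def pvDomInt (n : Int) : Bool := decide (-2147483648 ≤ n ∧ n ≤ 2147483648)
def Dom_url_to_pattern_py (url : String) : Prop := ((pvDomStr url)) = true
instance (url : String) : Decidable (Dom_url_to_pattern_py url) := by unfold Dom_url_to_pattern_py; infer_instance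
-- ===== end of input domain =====

-- B replaces A's one-pass accumulator loop (whose accumulator doubles as a started-flag) by find-first-keyword-index then map-and-join of the tail (alternative decomposition, same cost).

-- ===== PORT A =====
-- url.split("/"): sep is the non-empty literal "/", so PySem.Str.split? is always `some`; exact.
def pySplitSlash (s : String) : List String := (PySem.Str.split? s "/").getD []

def is_int_py (value : String) : Bool := (PySem.Int.ofStr? value).isSome

def stepA (result part : String) : String :=
  if (["commit", "commits", "pull", "files"] : List String).contains part then
    result ++ ("/" ++ part)
  else if result = "" then result
  else if is_int_py part then result ++ "/[D]"
  else result ++ "/[X]"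

def url_to_pattern_py (url : String) : String :=
  (pySplitSlash url).foldl stepA ""

-- ===== PORT B =====
def is_int_alt (value : String) : Bool := (PySem.Int.ofStr? value).isSome

def kwSet : PySem.Set String := PySem.Set.ofList ["commit", "commits", "pull", "files"]

def abstract_part (p : String) : String :=
  if PySem.Set.contains kwSet p then "/" ++ p
  else if is_int_alt p then "/[D]"
  else "/[X]"

def url_to_pattern_py_alt (url : String) : String :=
  let parts := pySplitSlash url
  match parts.findIdx? (fun p => PySem.Set.contains kwSet p) with
  | none => ""
  | some i => PySem.Str.join "" ((parts.drop i).map abstract_part)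

-- ===== PRECONDITION & SPEC =====
def Spec_url_to_pattern_py (url : String) (out : String) : Prop := out = url_to_pattern_py_alt url
instance (url : String) (out : String) : Decidable (Spec_url_to_pattern_py url out) := by unfold Spec_url_to_pattern_py; infer_instance

-- ===== CLAIM (what is proved, stated in full; the proofs are below) =====
def Claim_equal_url_to_pattern_py : Prop := ∀ (url : String), Dom_url_to_pattern_py url → Spec_url_to_pattern_py url (url_to_pattern_py url)

-- ===== LEMMAS AND PROOFS =====

lemma kw_eq (p : String) :
    PySem.Set.contains kwSet p
      = (["commit", "commits", "pull", "files"] : List String).contains p := by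
  have h : kwSet = (["commit", "commits", "pull", "files"] : List String) := by decide
  rw [h]
  simp [PySem.Set.contains_eq_listContains]

lemma str_append_assoc (a b c : String) : (a ++ b) ++ c = a ++ (b ++ c) := by
  apply String.toList_injective
  simp

lemma str_empty_append (s : String) : "" ++ s = s := by
  apply String.toList_injective
  simp

lemma slash_ne_empty (p : String) : ("/" ++ p) ≠ "" := by
  intro h
  have h2 := congrArg String.toList h
  simp at h2

lemma append_ne_empty (r s : String) (h : r ≠ "") : r ++ s ≠ "" := by
  intro he
  apply h
  have h2 := congrArg String.toList he
  simp at h2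
  exact String.toList_injective (by simp [h2.1])

lemma join_empty_nil : PySem.Str.join "" ([] : List String) = "" := by decide

lemma join_empty_cons (x : String) (xs : List String) :
    PySem.Str.join "" (x :: xs) = x ++ PySem.Str.join "" xs := by
  apply String.toList_injective
  cases xs with
  | nil =>
      simp [PySem.Str.toList_join, PySem.Chars.join_singleton, PySem.Chars.join_nil]
  | cons y ys =>
      simp [PySem.Str.toList_join, PySem.Chars.join_cons_cons]

lemma abstract_part_eq (p : String) :
    abstract_part p =
      (if (["commit", "commits", "pull", "files"] : List String).contains p then "/" ++ p
       else if is_int_py p then "/[D]" else "/[X]") := by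
  unfold abstract_part
  rw [kw_eq]
  rfl

lemma stepA_pos (r p : String)
    (h : (["commit", "commits", "pull", "files"] : List String).contains p = true) :
    stepA r p = r ++ ("/" ++ p) := by
  unfold stepA
  rw [if_pos h]

lemma stepA_neg (r p : String)
    (h : (["commit", "commits", "pull", "files"] : List String).contains p = false) :
    stepA r p = if r = "" then r else if is_int_py p then r ++ "/[D]" else r ++ "/[X]" := by
  unfold stepA
  rw [if_neg (by rw [h]; exact Bool.false_ne_true)]

lemma foldl_after (parts : List String) : ∀ r : String, r ≠ "" →
    parts.foldl stepA r = r ++ PySem.Str.join "" (parts.map abstract_part) := by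
  induction parts with
  | nil =>
      intro r _
      simp [join_empty_nil]
  | cons p ps ih =>
      intro r hr
      rw [List.foldl_cons, List.map_cons, join_empty_cons, abstract_part_eq]
      by_cases hkw : (["commit", "commits", "pull", "files"] : List String).contains p = true
      · rw [stepA_pos r p hkw, if_pos hkw, ih _ (append_ne_empty _ _ hr), str_append_assoc]
      · simp only [Bool.not_eq_true] at hkw
        by_cases hint : is_int_py p = true
        · simp only [stepA_neg r p hkw, if_neg hr, hint, if_true, hkw, Bool.false_eq_true,
            if_false]
          rw [ih _ (append_ne_empty _ _ hr), str_append_assoc]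
        · simp only [Bool.not_eq_true] at hint
          simp only [stepA_neg r p hkw, if_neg hr, hint, hkw, Bool.false_eq_true, if_false]
          rw [ih _ (append_ne_empty _ _ hr), str_append_assoc]

lemma foldl_from_empty (parts : List String) :
    parts.foldl stepA "" =
      (match parts.findIdx? (fun p => PySem.Set.contains kwSet p) with
       | none => ""
       | some i => PySem.Str.join "" ((parts.drop i).map abstract_part)) := by
  induction parts with
  | nil => rfl
  | cons p ps ih =>
      rw [List.foldl_cons, List.findIdx?_cons]
      by_cases hkw : (["commit", "commits", "pull", "files"] : List String).contains p = true
      · have hk2 : PySem.Set.contains kwSet p = true := by rw [kw_eq]; exact hkw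
        rw [stepA_pos _ _ hkw, str_empty_append]
        simp only [hk2, if_true, List.drop_zero, List.map_cons, join_empty_cons,
          abstract_part_eq, if_pos hkw]
        exact foldl_after ps _ (slash_ne_empty p)
      · simp only [Bool.not_eq_true] at hkw
        have hk2 : PySem.Set.contains kwSet p = false := by rw [kw_eq]; exact hkw
        rw [stepA_neg _ _ hkw, if_pos rfl, ih]
        simp only [hk2, Bool.false_eq_true, if_false]
        cases hfi : ps.findIdx? (fun p => PySem.Set.contains kwSet p) with
        | none => simp
        | some i => simp [List.drop_succ_cons]

-- ===== VERDICT (by name: the statement is the Claim_ definition above) =====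
theorem url_to_pattern_py_spec : Claim_equal_url_to_pattern_py := by
  intro url _
  unfold Spec_url_to_pattern_py url_to_pattern_py url_to_pattern_py_alt
  exact foldl_from_empty _
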